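-- pv_equiv track=rewrite | github.com/BijanRegmi/TheTypingCatAutomation | thetypingcat.py | breaks
-- ===== SOURCE A (Python) =====
-- def breaks(abc):
--     list_line = []
--     current = 0
--     line = """<div class="line">"""
--     for i in range(200):
--         loc = abc.find(line,current)
--         if loc == -1:
--             break
--         list_line.append(loc)
--         current = loc + len(line)
--     return list_line
-- ===== SOURCE B (Python) =====
-- def breaks(abc):
--     line = """<div class="line">"""
--     parts = abc.split(line)
--     out = []
--     offset = 0
--     for part in parts[:-1][:200]:
--         offset += len(part)
--         out.append(offset)
--         offset += len(line)
--     return out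
-- ===== Notes on version B (the rewrite author's own statement) =====
-- stated objective: alternative
-- what changed: Replaces the find-and-advance scan (repeated str.find with a moving start index) by one split on the delimiter followed by a cumulative-length pass over the segments that derives each match position arithmetically.
import Mathlib
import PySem

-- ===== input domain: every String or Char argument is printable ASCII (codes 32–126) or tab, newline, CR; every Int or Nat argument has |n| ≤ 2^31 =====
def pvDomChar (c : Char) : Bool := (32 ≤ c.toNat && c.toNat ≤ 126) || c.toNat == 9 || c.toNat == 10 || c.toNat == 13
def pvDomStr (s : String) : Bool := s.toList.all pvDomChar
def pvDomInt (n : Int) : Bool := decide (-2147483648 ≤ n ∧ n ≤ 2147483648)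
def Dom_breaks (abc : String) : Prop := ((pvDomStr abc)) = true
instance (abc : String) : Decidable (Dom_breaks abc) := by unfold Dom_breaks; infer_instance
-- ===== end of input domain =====

-- B replaces A's find-and-advance scan by a single split on the delimiter followed by a
-- cumulative-length pass over the segments (objective: alternative decomposition, same cost).


-- ===== PORT A =====
-- the 'for i in range(200)' loop of A: fuel counts the remaining iterations
def breaksLoopA (abc line : String) : Nat → Int → List Int → List Int
  | 0, _, acc => acc
  | fuel + 1, current, acc =>
    let loc := PySem.Str.findFrom abc line current
    if loc = -1 then acc
    else breaksLoopA abc line fuel (loc + PySem.Str.len line) (acc ++ [loc])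

def breaks (abc : String) : List Int :=
  breaksLoopA abc "<div class=\"line\">" 200 0 []

-- ===== PORT B =====
-- the 'for part in parts[:-1][:200]' loop of B: state = (offset, out)
def breaksStepB (line : String) (st : Int × List Int) (part : List Char) : Int × List Int :=
  let offset := st.1 + (part.length : Int)
  (offset + PySem.Str.len line, st.2 ++ [offset])

def breaks_alt (abc : String) : List Int :=
  let line := "<div class=\"line\">"
  let parts := PySem.Chars.splitOn abc.toList line.toList
  ((PySem.List.slice (PySem.List.slice parts none (some (-1))) none (some 200)).foldl
      (breaksStepB line) (0, [])).2

-- ===== PRECONDITION & SPEC =====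
def Spec_breaks (abc : String) (out : List Int) : Prop := out = breaks_alt abc
instance (abc : String) (out : List Int) : Decidable (Spec_breaks abc out) := by unfold Spec_breaks; infer_instance

-- ===== CLAIM (what is proved, stated in full; the proofs are below) =====
def Claim_equal_breaks : Prop := ∀ (abc : String), Dom_breaks abc → Spec_breaks abc (breaks abc)

-- ===== LEMMAS AND PROOFS =====

-- reference: positions of the first `fuel` non-overlapping matches of sep in s, offset by base
def refP (sep : List Char) : Nat → List Char → Nat → List Int
  | 0, _, _ => []
  | fuel + 1, s, base =>
    let j := PySem.Chars.find s sep
    if j = -1 then []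
    else ((base : Int) + j) :: refP sep fuel (s.drop (j.toNat + sep.length)) (base + j.toNat + sep.length)

-- split normal form with explicit fuel (fuel ≥ s.length makes it fuel-independent)
def msp (sep : List Char) : Nat → List Char → List (List Char)
  | 0, s => [s]
  | fuel + 1, s =>
    let j := PySem.Chars.find s sep
    if j = -1 then [s]
    else s.take j.toNat :: msp sep fuel (s.drop (j.toNat + sep.length))

-- find l sep = m given a first occurrence at m
theorem find_eq_of (l sep : List Char) (m : Nat) (h1 : sep <+: l.drop m)
    (h2 : ∀ i < m, ¬ sep <+: l.drop i) : PySem.Chars.find l sep = (m : Int) := by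
  have hnn : 0 ≤ PySem.Chars.find l sep := by
    rw [PySem.Chars.find_nonneg_iff]
    exact List.IsInfix.trans h1.isInfix (List.drop_suffix m l).isInfix
  obtain ⟨hp, hmin⟩ := PySem.Chars.find_spec hnn
  rcases lt_trichotomy (PySem.Chars.find l sep).toNat m with h | h | h
  · exact absurd hp (h2 _ h)
  · omega
  · exact absurd h1 (hmin m h)

-- occurrence bound: a match at j needs j + |sep| ≤ |s|
theorem find_add_len_le (s sep : List Char) (h : 0 ≤ PySem.Chars.find s sep) :
    (PySem.Chars.find s sep).toNat + sep.length ≤ s.length := by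
  have hp := (PySem.Chars.find_spec h).1
  have h1 := hp.length_le
  have h2 := PySem.Chars.find_le_length s sep
  simp [List.length_drop] at h1
  omega

theorem find_nil_neg (sep : List Char) (hsep : sep ≠ []) :
    PySem.Chars.find [] sep = -1 := by
  rw [PySem.Chars.find_eq_neg_one_iff, List.infix_nil]
  exact hsep

-- find s sep = -1 makes msp trivial at every fuel
theorem msp_of_neg (sep : List Char) (fuel : Nat) (s : List Char)
    (h : PySem.Chars.find s sep = -1) : msp sep fuel s = [s] := by
  cases fuel with
  | zero => rfl
  | succ f => simp [msp, h]

theorem msp_ne_nil (sep : List Char) (fuel : Nat) (s : List Char) : msp sep fuel s ≠ [] := by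
  cases fuel with
  | zero => simp [msp]
  | succ f => simp only [msp]; split <;> simp

theorem msp_fuel_irrel (sep : List Char) (hsep : sep ≠ []) :
    ∀ f1 f2 s, s.length ≤ f1 → s.length ≤ f2 → msp sep f1 s = msp sep f2 s := by
  intro f1
  induction f1 with
  | zero =>
    intro f2 s h1 _
    have hs : s = [] := by cases s <;> simp_all
    subst hs
    rw [msp_of_neg sep _ _ (find_nil_neg sep hsep), msp_of_neg sep _ _ (find_nil_neg sep hsep)]
  | succ f ih =>
    intro f2 s h1 h2
    by_cases hj : PySem.Chars.find s sep = -1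
    · rw [msp_of_neg _ _ _ hj, msp_of_neg _ _ _ hj]
    · have hnn : 0 ≤ PySem.Chars.find s sep := by
        have := PySem.Chars.neg_one_le_find s sep; omega
      have hb := find_add_len_le s sep hnn
      have hL : 1 ≤ sep.length := by cases sep <;> simp_all
      cases f2 with
      | zero =>
        exfalso
        have hs : s = [] := by cases s <;> simp_all
        rw [hs, find_nil_neg sep hsep] at hj
        exact hj rfl
      | succ f2' =>
        simp only [msp, if_neg hj]
        rw [ih f2' _ (by simp only [List.length_drop]; omega)
              (by simp only [List.length_drop]; omega)]

-- positive unfolding of msp under sufficient fuel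
theorem msp_unfold_pos (sep : List Char) (hsep : sep ≠ []) (f : Nat) (s : List Char)
    (hf : s.length ≤ f) (hj : 0 ≤ PySem.Chars.find s sep) :
    msp sep f s = s.take (PySem.Chars.find s sep).toNat ::
      msp sep (s.drop ((PySem.Chars.find s sep).toNat + sep.length)).length
        (s.drop ((PySem.Chars.find s sep).toNat + sep.length)) := by
  have hb := find_add_len_le s sep hj
  have hL : 1 ≤ sep.length := by cases sep <;> simp_all
  cases f with
  | zero =>
    exfalso
    have hs : s = [] := by cases s <;> simp_all
    rw [hs, find_nil_neg sep hsep] at hj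
    omega
  | succ f =>
    have hne : ¬ PySem.Chars.find s sep = -1 := by omega
    simp only [msp, if_neg hne]
    rw [msp_fuel_irrel sep hsep f _ _ (by simp only [List.length_drop]; omega) le_rfl]

theorem find_cons_of_prefix (c : Char) (rest sep : List Char)
    (hp : sep.isPrefixOf (c :: rest) = true) : PySem.Chars.find (c :: rest) sep = 0 := by
  have h1 : sep <+: (c :: rest).drop 0 := by
    simpa using (List.isPrefixOf_iff_prefix.mp hp)
  simpa using find_eq_of (c :: rest) sep 0 h1 (by omega)

theorem infix_cons_cases (c : Char) (rest sep : List Char) (h : sep <:+: (c :: rest)) :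
    sep <+: (c :: rest) ∨ sep <:+: rest := by
  have := (PySem.Chars.exists_prefix_drop_iff_isIn sep (c :: rest)).mpr
    ((PySem.Chars.isIn_iff_infix sep (c :: rest)).mpr h)
  obtain ⟨j, hj⟩ := this
  cases j with
  | zero => exact Or.inl (by simpa using hj)
  | succ j' =>
    right
    simp only [List.drop_succ_cons] at hj
    exact hj.isInfix.trans (List.drop_suffix j' rest).isInfix

theorem find_cons_of_neg (c : Char) (rest sep : List Char)
    (hp : ¬ sep <+: (c :: rest)) (hr : PySem.Chars.find rest sep = -1) :
    PySem.Chars.find (c :: rest) sep = -1 := by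
  rw [PySem.Chars.find_eq_neg_one_iff]
  intro hinf
  rcases infix_cons_cases c rest sep hinf with h | h
  · exact hp h
  · rw [PySem.Chars.find_eq_neg_one_iff] at hr
    exact hr h

theorem find_cons_of_pos (c : Char) (rest sep : List Char)
    (hp : ¬ sep <+: (c :: rest)) (hr : 0 ≤ PySem.Chars.find rest sep) :
    PySem.Chars.find (c :: rest) sep = PySem.Chars.find rest sep + 1 := by
  obtain ⟨hpre, hmin⟩ := PySem.Chars.find_spec hr
  have h1 : sep <+: (c :: rest).drop ((PySem.Chars.find rest sep).toNat + 1) := by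
    simpa [List.drop_succ_cons] using hpre
  have h2 : ∀ i < (PySem.Chars.find rest sep).toNat + 1, ¬ sep <+: (c :: rest).drop i := by
    intro i hi
    cases i with
    | zero => simpa using hp
    | succ i' =>
      simp only [List.drop_succ_cons]
      exact hmin i' (by omega)
  have := find_eq_of (c :: rest) sep ((PySem.Chars.find rest sep).toNat + 1) h1 h2
  omega

theorem modifyHead_nilpre (T : List (List Char)) :
    T.modifyHead (fun a => ([] : List Char) ++ a) = T := by
  cases T <;> simp

theorem splitOn_go_spec (sep : List Char) (hsep : sep ≠ []) :
    ∀ fuel l cur acc, l.length < fuel →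
      PySem.Chars.splitOn.go sep fuel l cur acc =
        acc.reverse ++ (msp sep l.length l).modifyHead (cur.reverse ++ ·) := by
  intro fuel
  induction fuel with
  | zero => intro l cur acc h; omega
  | succ f ih =>
    intro l cur acc h
    cases l with
    | nil =>
      show (cur.reverse :: acc).reverse = _
      simp [msp]
    | cons c rest =>
      have hgo : PySem.Chars.splitOn.go sep (f+1) (c::rest) cur acc =
          if sep.isPrefixOf (c::rest) then
            PySem.Chars.splitOn.go sep f ((c::rest).drop sep.length) [] (cur.reverse :: acc)
          else PySem.Chars.splitOn.go sep f rest (c :: cur) acc := rfl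
      rw [hgo]
      by_cases hp : sep.isPrefixOf (c::rest)
      · rw [if_pos hp]
        have hf0 : PySem.Chars.find (c::rest) sep = 0 := find_cons_of_prefix c rest sep hp
        have hlen : sep.length ≤ (c::rest).length :=
          (List.isPrefixOf_iff_prefix.mp hp).length_le
        have hL : 1 ≤ sep.length := by cases sep <;> simp_all
        rw [ih ((c::rest).drop sep.length) [] (cur.reverse :: acc)
              (by simp only [List.length_drop]; simp at h ⊢; omega)]
        rw [msp_unfold_pos sep hsep (c::rest).length (c::rest) le_rfl (by omega)]
        simp only [hf0, Int.toNat_zero, List.take_zero, Nat.zero_add, List.reverse_nil,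
          modifyHead_nilpre, List.modifyHead_cons, List.reverse_cons, List.append_nil]
        simp
      · rw [if_neg hp]
        rw [ih rest (c::cur) acc (by simp at h ⊢; omega)]
        have hp' : ¬ sep <+: (c::rest) := fun hc => hp (List.isPrefixOf_iff_prefix.mpr hc)
        by_cases hr : PySem.Chars.find rest sep = -1
        · have hl : PySem.Chars.find (c::rest) sep = -1 := find_cons_of_neg c rest sep hp' hr
          rw [msp_of_neg _ _ _ hr, msp_of_neg _ _ _ hl]
          simp [List.modifyHead]
        · have hnn : 0 ≤ PySem.Chars.find rest sep := by
            have := PySem.Chars.neg_one_le_find rest sep; omega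
          have hl := find_cons_of_pos c rest sep hp' hnn
          rw [msp_unfold_pos sep hsep rest.length rest le_rfl hnn,
              msp_unfold_pos sep hsep (c::rest).length (c::rest) le_rfl (by omega)]
          have hjn : (PySem.Chars.find (c::rest) sep).toNat =
              (PySem.Chars.find rest sep).toNat + 1 := by omega
          rw [hjn]
          have harith : (PySem.Chars.find rest sep).toNat + 1 + sep.length =
              ((PySem.Chars.find rest sep).toNat + sep.length) + 1 := by omega
          rw [harith]
          simp only [List.take_succ_cons, List.drop_succ_cons, List.modifyHead,
            List.reverse_cons]
          simp

theorem splitOn_eq_msp (sep s : List Char) (hsep : sep ≠ []) :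
    PySem.Chars.splitOn s sep = msp sep s.length s := by
  show PySem.Chars.splitOn.go sep (s.length + 1) s [] [] = _
  rw [splitOn_go_spec sep hsep (s.length + 1) s [] [] (by omega)]
  simp only [List.reverse_nil, List.nil_append]
  cases msp sep s.length s <;> rfl

-- A's loop computes refP on the unscanned suffix
theorem loopA_eq_refP (abc line : String) :
    ∀ fuel (k : Nat) acc, k ≤ abc.toList.length →
      breaksLoopA abc line fuel (k : Int) acc =
        acc ++ refP line.toList fuel (abc.toList.drop k) k := by
  intro fuel
  induction fuel with
  | zero => intro k acc hk; simp [breaksLoopA, refP]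
  | succ f ih =>
    intro k acc hk
    simp only [breaksLoopA]
    rw [PySem.Str.findFrom_eq, PySem.Chars.findFrom_natCast abc.toList line.toList k hk]
    by_cases hj : PySem.Chars.find (abc.toList.drop k) line.toList = -1
    · simp [refP, hj]
    · have hnn : 0 ≤ PySem.Chars.find (abc.toList.drop k) line.toList := by
        have := PySem.Chars.neg_one_le_find (abc.toList.drop k) line.toList; omega
      have hb := find_add_len_le (abc.toList.drop k) line.toList hnn
      simp only [List.length_drop] at hb
      rw [if_neg hj]
      have hne : ¬ ((k : Int) + PySem.Chars.find (abc.toList.drop k) line.toList = -1) := by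
        omega
      rw [if_neg hne, PySem.Str.len_eq]
      have hcast : (k : Int) + PySem.Chars.find (abc.toList.drop k) line.toList +
          (line.toList.length : Int) =
          ((k + (PySem.Chars.find (abc.toList.drop k) line.toList).toNat +
            line.toList.length : Nat) : Int) := by push_cast; omega
      rw [hcast, ih _ _ (by omega)]
      simp only [refP, if_neg hj]
      rw [List.drop_drop]
      simp only [Nat.add_assoc, List.append_assoc, List.singleton_append]

-- B's fold over the split segments computes refP too
theorem foldB_eq_refP (line : String) (hsep : line.toList ≠ []) :
    ∀ mfuel (s : List Char), s.length ≤ mfuel → ∀ (fuel : Nat) (base : Nat) (out : List Int),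
      (((msp line.toList mfuel s).dropLast.take fuel).foldl (breaksStepB line)
          ((base : Int), out)).2 = out ++ refP line.toList fuel s base := by
  intro mfuel
  induction mfuel with
  | zero =>
    intro s hs fuel base out
    have hsnil : s = [] := by cases s <;> simp_all
    subst hsnil
    have hr : refP line.toList fuel [] base = [] := by
      cases fuel <;> simp [refP, find_nil_neg _ hsep]
    simp [msp, hr]
  | succ mf ih =>
    intro s hs fuel base out
    by_cases hj : PySem.Chars.find s line.toList = -1
    · rw [msp_of_neg _ _ _ hj]
      have hr : refP line.toList fuel s base = [] := by
        cases fuel <;> simp [refP, hj]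
      simp [hr]
    · have hnn : 0 ≤ PySem.Chars.find s line.toList := by
        have := PySem.Chars.neg_one_le_find s line.toList; omega
      have hb := find_add_len_le s line.toList hnn
      have hL : 1 ≤ line.toList.length := by
        cases hln : line.toList <;> simp_all
      simp only [msp, if_neg hj]
      rw [List.dropLast_cons_of_ne_nil (msp_ne_nil _ _ _)]
      cases fuel with
      | zero => simp [refP]
      | succ f =>
        rw [List.take_succ_cons, List.foldl_cons]
        have hstep : breaksStepB line ((base : Int), out) (s.take (PySem.Chars.find s line.toList).toNat) =
            (((base + (PySem.Chars.find s line.toList).toNat + line.toList.length : Nat) : Int),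
              out ++ [(base : Int) + PySem.Chars.find s line.toList]) := by
          simp only [breaksStepB, PySem.Str.len_eq, List.length_take]
          have h1 : min (PySem.Chars.find s line.toList).toNat s.length =
              (PySem.Chars.find s line.toList).toNat := by omega
          rw [h1]
          have e1 : ((base:Int) + ((PySem.Chars.find s line.toList).toNat : Int) +
              (line.toList.length : Int)) =
              ((base + (PySem.Chars.find s line.toList).toNat + line.toList.length : Nat) : Int) := by
            push_cast; omega
          have e2 : ((base:Int) + ((PySem.Chars.find s line.toList).toNat : Int)) =
              (base : Int) + PySem.Chars.find s line.toList := by omega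
          rw [e1, e2]
        rw [hstep, ih _ (by simp only [List.length_drop]; omega) f _ _]
        simp only [refP, if_neg hj]
        simp [List.append_assoc]

-- ===== VERDICT (by name: the statement is the Claim_ definition above) =====
theorem breaks_spec : Claim_equal_breaks := by
  intro abc _
  have hsep : ("<div class=\"line\">" : String).toList ≠ [] := by decide
  simp only [Spec_breaks, breaks, breaks_alt]
  rw [PySem.List.slice_to_neg_one, show (200:Int) = ((200:Nat):Int) from rfl,
      PySem.List.slice_to_natCast, splitOn_eq_msp _ _ hsep]
  have hA := loopA_eq_refP abc "<div class=\"line\">" 200 0 [] (Nat.zero_le _)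
  have hB := foldB_eq_refP _ hsep abc.toList.length abc.toList le_rfl 200 0 []
  simpa using hA.trans (by simpa using hB.symm)
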